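-- pv_equiv track=rewrite | github.com/KoSinRin/Combinations_in_genomes | find_duplicate_combinations.py | find_duplicate_combinations
-- ===== SOURCE A (Python) =====
-- from typing import List
-- from collections import Counter
--
-- def find_duplicate_combinations(genome: str, length: int, sort_by: str = "combination") -> List[str]:
--     if not isinstance(length, int) or length > len(genome):
--         return []
--
--     combinations = Counter(genome[i:i+length] for i in range(len(genome) - length + 1))
--     result = list(filter(lambda x: combinations[x] > 1, combinations))
--
--     combination_to_distance = {}
--
--     for combination in result:
--         indices = [i for i in range(len(genome)) if genome[i:i+length] == combination]
--         distances = [abs(indices[i] - indices[i+1]) for i in range(len(indices)-1)]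
--         combination_to_distance[combination] = min(distances)
--
--     result = [combination for combination in result if combination_to_distance[combination] == min(combination_to_distance.values())]
--
--     if sort_by == "frequency":
--         result = sorted(result, key=lambda x: combinations[x], reverse=True)
--     elif sort_by == "combination":
--         result = sorted(result)
--     elif sort_by == "distance":
--         result = sorted(result, key=lambda x: combination_to_distance[x])
--
--     return result
-- ===== SOURCE B (Python) =====
-- def find_duplicate_combinations(genome, length, sort_by="combination"):
--     # One pass recording the start positions of every length-window; min gaps computed
--     # directly from consecutive positions (A re-scans the whole genome per duplicate).
--     n = len(genome)
--     if not isinstance(length, int) or length < 1 or length > n: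
--         return []
--     positions = {}
--     for i in range(n - length + 1):
--         positions.setdefault(genome[i:i+length], []).append(i)
--     gaps = [(sub, min(b - a for a, b in zip(pos, pos[1:])))
--             for sub, pos in positions.items() if len(pos) > 1]
--     if not gaps:
--         return []
--     best = min(g for _, g in gaps)
--     result = [sub for sub, g in gaps if g == best]
--     if sort_by == "frequency":
--         result = sorted(result, key=lambda s: len(positions[s]), reverse=True)
--     elif sort_by == "combination":
--         result = sorted(result)
--     # sort_by == "distance": every selected substring has the same (minimal) gap,
--     # so a stable sort by gap leaves the order unchanged.
--     return result
-- ===== Notes on version B (the rewrite author's own statement) =====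
-- stated objective: alternative
-- what changed: One pass records each window's start positions in a dict and min gaps are computed directly from consecutive positions, replacing A's Counter pass plus a full-genome re-scan (and per-pair index arithmetic) for every duplicate substring; intended to avoid A's rescans, measured only 1.4-2.7x on the timing family, so no speed is claimed.
-- outside the precondition, e.g. on find_duplicate_combinations('ab', 0, 'combination'): A returns [''], B returns []; on find_duplicate_combinations('aaaa', -2, 'combination'): A returns ['', 'aa'], B returns []; on find_duplicate_combinations('a', 0, 'combination'): A raises ValueError, B returns []
import Mathlib
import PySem

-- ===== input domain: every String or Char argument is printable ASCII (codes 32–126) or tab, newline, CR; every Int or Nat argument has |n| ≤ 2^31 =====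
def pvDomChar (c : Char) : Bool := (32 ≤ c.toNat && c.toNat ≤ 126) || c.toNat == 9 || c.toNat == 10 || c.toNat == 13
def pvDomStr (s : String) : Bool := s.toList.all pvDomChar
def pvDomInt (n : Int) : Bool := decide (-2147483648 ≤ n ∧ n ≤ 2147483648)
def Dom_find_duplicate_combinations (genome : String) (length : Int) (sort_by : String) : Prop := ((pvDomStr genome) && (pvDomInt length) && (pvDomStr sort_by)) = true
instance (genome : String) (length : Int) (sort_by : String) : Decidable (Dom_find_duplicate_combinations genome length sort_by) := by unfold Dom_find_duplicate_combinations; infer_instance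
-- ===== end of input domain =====

-- B replaces A's Counter pass plus a full-genome re-scan per duplicate substring by ONE pass that
-- records each window's start positions; min gaps come directly from consecutive positions.

-- ===== PORT A =====
-- genome[i:i+length] as a string (used by both ports for the window slice)
def pvWin (g : List Char) (length i : Int) : String :=
  String.ofList (PySem.List.slice g (some i) (some (i + length)))

-- body of A's per-duplicate loop: all indices of the combination in the genome,
-- the consecutive |distances|, and their min
def pvMinDistA (g : List Char) (length n : Int) (c : String) : Int :=
  let indices := (PySem.List.pyRange 0 n 1).filter (fun i => pvWin g length i == c)
  let distances := (PySem.List.pyRange 0 (PySem.List.len indices - 1) 1).map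
      (fun i => |PySem.List.pyGetD indices i 0 - PySem.List.pyGetD indices (i + 1) 0|)
  (PySem.List.min? distances (fun x => x)).getD 0

def find_duplicate_combinations (genome : String) (length : Int) (sort_by : String) : List String :=
  if length > PySem.Str.len genome then []
  else
    let g := genome.toList
    let combinations := PySem.Dict.counter
      ((PySem.List.pyRange 0 (PySem.Str.len genome - length + 1) 1).map (fun i => pvWin g length i))
    let result := combinations.keys.filter (fun x => decide (1 < combinations.getD x 0))
    let c2d := result.foldl
      (fun d c => d.insert c (pvMinDistA g length (PySem.Str.len genome) c)) PySem.Dict.empty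
    let result2 := result.filter (fun c =>
        c2d.getD c 0 == (PySem.List.min? c2d.values (fun x => x)).getD 0)
    if sort_by == "frequency" then PySem.List.sorted result2 (fun x => combinations.getD x 0) true
    else if sort_by == "combination" then PySem.List.sorted result2 (fun x => x) false
    else if sort_by == "distance" then PySem.List.sorted result2 (fun x => c2d.getD x 0) false
    else result2

-- ===== PORT B =====
-- min(b - a for a, b in zip(pos, pos[1:]))
def pvGapOf (pos : List Int) : Int :=
  (PySem.List.min? ((pos.zip pos.tail).map (fun q => q.2 - q.1)) (fun x => x)).getD 0

def find_duplicate_combinations_alt (genome : String) (length : Int) (sort_by : String) : List String :=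
  let n := PySem.Str.len genome
  if length < 1 || n < length then []
  else
    let g := genome.toList
    let positions := ((PySem.List.pyRange 0 (n - length + 1) 1).map (fun i => (pvWin g length i, i))).foldl
        (fun d p => d.modify p.1 [] (fun x => x ++ [p.2])) PySem.Dict.empty
    let gaps := (positions.items.filter (fun p => decide (1 < p.2.length))).map
        (fun p => (p.1, pvGapOf p.2))
    if gaps.isEmpty then []
    else
      let best := (PySem.List.min? (gaps.map (fun p => p.2)) (fun x => x)).getD 0
      let result := (gaps.filter (fun p => p.2 == best)).map (fun p => p.1)
      if sort_by == "frequency" then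
        PySem.List.sorted result (fun s => PySem.List.len (positions.getD s [])) true
      else if sort_by == "combination" then PySem.List.sorted result (fun x => x) false
      else result

-- ===== PRECONDITION & SPEC =====
-- Pre_ excludes non-positive window lengths (outside the task's natural domain): there the Python A
-- either raises ValueError (min() of an empty sequence) or returns empty-string "combinations"
-- that are artefacts of Python's negative-slice clamping, while B naturally returns [].
def Pre_find_duplicate_combinations (genome : String) (length : Int) (sort_by : String) : Prop :=
  1 ≤ length
instance (genome : String) (length : Int) (sort_by : String) : Decidable (Pre_find_duplicate_combinations genome length sort_by) := by unfold Pre_find_duplicate_combinations; infer_instance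

def pvWitness_find_duplicate_combinations : String × Int × String := ("abab", 2, "combination")

def Spec_find_duplicate_combinations (genome : String) (length : Int) (sort_by : String) (out : List String) : Prop := out = find_duplicate_combinations_alt genome length sort_by
instance (genome : String) (length : Int) (sort_by : String) (out : List String) : Decidable (Spec_find_duplicate_combinations genome length sort_by out) := by unfold Spec_find_duplicate_combinations; infer_instance

-- ===== CLAIM (what is proved, stated in full; the proofs are below) =====
def Claim_equal_find_duplicate_combinations : Prop := ∀ (genome : String) (length : Int) (sort_by : String), Dom_find_duplicate_combinations genome length sort_by → Pre_find_duplicate_combinations genome length sort_by → Spec_find_duplicate_combinations genome length sort_by (find_duplicate_combinations genome length sort_by)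

-- ===== LEMMAS AND PROOFS =====

-- the occurrence positions of window string c among the m = n-L+1 windows, as Python ints
def pvPos (g : List Char) (L m : Nat) (c : String) : List Int :=
  ((List.range m).filter (fun (j : Nat) => pvWin g (L : Int) (j : Int) == c)).map (fun (j : Nat) => (j : Int))

-- the duplicated windows, in first-occurrence order
def pvDups (g : List Char) (L m : Nat) : List String :=
  (PySem.Set.ofList ((List.range m).map (fun (j : Nat) => pvWin g (L : Int) (j : Int)))).filter
    (fun c => decide (1 < (pvPos g L m c).length))

-- common canonical form both ports are reduced to
def pvCanon (g : List Char) (L m : Nat) (sort_by : String) : List String :=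
  let dups := pvDups g L m
  let best := (PySem.List.min? (dups.map (fun c => pvGapOf (pvPos g L m c))) (fun x => x)).getD 0
  let result := dups.filter (fun c => pvGapOf (pvPos g L m c) == best)
  if sort_by == "frequency" then
    PySem.List.sorted result (fun c => ((pvPos g L m c).length : Int)) true
  else if sort_by == "combination" then PySem.List.sorted result (fun x => x) false
  else result

lemma pvWin_toList (g : List Char) (L j : Nat) :
    (pvWin g (L : Int) (j : Int)).toList = (g.drop j).take L := by
  simp [pvWin, PySem.List.slice_natCast_add]

lemma pvWin_ne (g : List Char) (L j j0 : Nat) (hL : 1 ≤ L) (hj : g.length - L + 1 ≤ j)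
    (hj0 : j0 < g.length - L + 1) (hLn : L ≤ g.length) :
    ¬ (pvWin g (L : Int) (j : Int) = pvWin g (L : Int) (j0 : Int)) := by
  intro h
  have h1 : ((pvWin g (L : Int) (j : Int)).toList).length = min L (g.length - j) := by
    rw [pvWin_toList]; simp
  have h2 : ((pvWin g (L : Int) (j0 : Int)).toList).length = min L (g.length - j0) := by
    rw [pvWin_toList]; simp
  rw [h] at h1
  rw [h2] at h1
  omega

lemma pvFilter_range (g : List Char) (L n : Nat) (hg : g.length = n) (hL : 1 ≤ L) (hLn : L ≤ n)
    (c : String) (hc : c ∈ (List.range (n - L + 1)).map (fun (j : Nat) => pvWin g (L : Int) (j : Int))) :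
    (List.range n).filter (fun (j : Nat) => pvWin g (L : Int) (j : Int) == c)
      = (List.range (n - L + 1)).filter (fun (j : Nat) => pvWin g (L : Int) (j : Int) == c) := by
  obtain ⟨j0, hj0, rfl⟩ := List.mem_map.mp hc
  have hj0' : j0 < n - L + 1 := by simpa using hj0
  have hsplit : List.range n = List.range (n - L + 1) ++ (List.range (n - (n - L + 1))).map (fun x => (n - L + 1) + x) := by
    rw [← List.range_add]
    congr 1
    omega
  rw [hsplit, List.filter_append]
  have h2 : ((List.range (n - (n - L + 1))).map (fun x => (n - L + 1) + x)).filter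
      (fun (j : Nat) => pvWin g (L : Int) (j : Int) == pvWin g (L : Int) (j0 : Int)) = [] := by
    apply List.filter_eq_nil_iff.mpr
    intro a ha
    obtain ⟨x, _, rfl⟩ := List.mem_map.mp ha
    simp only [beq_iff_eq]
    exact pvWin_ne g L ((n - L + 1) + x) j0 hL (by omega) (by omega) (by omega)
  rw [h2, List.append_nil]

lemma pvZip (P : List Int) (hp : P.Pairwise (· < ·)) :
    (PySem.List.pyRange 0 (PySem.List.len P - 1) 1).map
        (fun i => |PySem.List.pyGetD P i 0 - PySem.List.pyGetD P (i + 1) 0|)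
      = (P.zip P.tail).map (fun q => q.2 - q.1) := by
  rcases P with _ | ⟨a, Q⟩
  · decide
  · have hlen : PySem.List.len (a :: Q) - 1 = ((Q.length : Nat) : Int) := by
      simp [PySem.List.len_eq]
    rw [hlen, PySem.List.pyRange_zero_natCast, List.map_map]
    apply List.ext_getElem
    · simp [List.length_zip]
    · intro j hj1 hj2
      have hjQ : j < Q.length := by simpa using hj1
      have hj' : j < (a :: Q).length := by simp; omega
      have hj'' : j + 1 < (a :: Q).length := by simp; omega
      simp only [List.getElem_map, List.getElem_range, Function.comp_apply, List.getElem_zip,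
        List.getElem_tail]
      have e1 : PySem.List.pyGetD (a :: Q) ((j : Nat) : Int) 0 = (a :: Q)[j]'hj' := by
        rw [PySem.List.pyGetD_natCast]
        exact List.getD_eq_getElem _ _ hj'
      have e2 : PySem.List.pyGetD (a :: Q) (((j : Nat) : Int) + 1) 0 = (a :: Q)[j + 1]'hj'' := by
        have hc : ((j : Nat) : Int) + 1 = (((j + 1 : Nat)) : Int) := by push_cast; ring
        rw [hc, PySem.List.pyGetD_natCast]
        exact List.getD_eq_getElem _ _ hj''
      rw [e1, e2]
      have hlt : (a :: Q)[j]'hj' < (a :: Q)[j + 1]'hj'' :=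
        List.pairwise_iff_getElem.mp hp j (j + 1) hj' hj'' (by omega)
      rw [abs_sub_comm, abs_of_pos (by omega)]

lemma pvPos_pairwise (g : List Char) (L m : Nat) (c : String) :
    (pvPos g L m c).Pairwise (· < ·) := by
  unfold pvPos
  rw [List.pairwise_map]
  exact List.Pairwise.imp (fun h => by exact_mod_cast h) (List.pairwise_lt_range.filter _)

lemma pvPos_count (g : List Char) (L m : Nat) (c : String) :
    List.count c ((List.range m).map (fun (j : Nat) => pvWin g (L : Int) (j : Int)))
      = (pvPos g L m c).length := by
  rw [List.count_eq_countP, List.countP_map, pvPos, List.length_map,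
    List.countP_eq_length_filter]
  rfl

-- A reduced to the canonical form
lemma pvA_eq (genome : String) (length : Int) (sort_by : String) (L n : Nat)
    (hg : genome.toList.length = n) (hlen : length = (L : Int)) (hL : 1 ≤ L) (hLn : L ≤ n) :
    find_duplicate_combinations genome length sort_by
      = pvCanon genome.toList L (n - L + 1) sort_by := by
  have hlen' : PySem.Str.len genome = (n : Int) := by rw [PySem.Str.len_eq, hg]
  have hm : (n : Int) - (L : Int) + 1 = ((n - L + 1 : Nat) : Int) := by omega
  unfold find_duplicate_combinations
  rw [hlen, hlen', if_neg (by omega)]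
  simp only [hm, PySem.List.pyRange_zero_natCast, List.map_map, Function.comp_def]
  set m := n - L + 1 with hmdef
  set g := genome.toList with hgdef
  set S := (List.range m).map (fun (j : Nat) => pvWin g (L : Int) (j : Int)) with hS
  have hcnt : ∀ c, (PySem.Dict.counter S).getD c 0 = ((pvPos g L m c).length : Int) := by
    intro c
    rw [PySem.Dict.getD_counter, pvPos_count]
  have hdups : (PySem.Dict.counter S).keys.filter
      (fun x => decide (1 < (PySem.Dict.counter S).getD x 0)) = pvDups g L m := by
    rw [PySem.Dict.keys_counter]
    unfold pvDups
    rw [hS]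
    apply List.filter_congr
    intro x _
    rw [hcnt x]
    simp [Nat.one_lt_cast]
  rw [hdups]
  have hMD : ∀ c ∈ pvDups g L m,
      pvMinDistA g (L : Int) (n : Int) c = pvGapOf (pvPos g L m c) := by
    intro c hc
    have hcS : c ∈ (List.range m).map (fun (j : Nat) => pvWin g (L : Int) (j : Int)) := by
      have h1 : c ∈ PySem.Set.ofList S := List.mem_of_mem_filter hc
      exact (PySem.Set.mem_ofList _ _).mp h1
    unfold pvMinDistA
    rw [PySem.List.pyRange_zero_natCast, List.filter_map]
    simp only [Function.comp_def]
    rw [hmdef] at hcS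
    rw [pvFilter_range g L n hg hL hLn c hcS]
    have hP : ((List.range (n - L + 1)).filter (fun (j : Nat) => pvWin g (L : Int) (j : Int) == c)).map
        (fun (j : Nat) => (j : Int)) = pvPos g L m c := rfl
    rw [hP, pvZip (pvPos g L m c) (pvPos_pairwise g L m c)]
    rfl
  set c2d := (pvDups g L m).foldl
      (fun d c => d.insert c (pvMinDistA g (L : Int) (n : Int) c)) PySem.Dict.empty with hc2d
  have hnodupD : (pvDups g L m).Nodup := (PySem.Set.nodup_ofList S).filter _
  have hitems : c2d.items
      = (pvDups g L m).map (fun c => (c, pvMinDistA g (L : Int) (n : Int) c)) := by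
    rw [hc2d]
    have := PySem.Dict.items_foldl_insert_fresh (pvDups g L m) (fun c => c)
      (fun c => pvMinDistA g (L : Int) (n : Int) c) PySem.Dict.empty
      (fun a _ => PySem.Dict.contains_empty _) (by simpa using hnodupD)
    simpa using this
  have hkeys2 : c2d.keys = pvDups g L m := by
    simp only [PySem.Dict.keys, hitems, List.map_map, Function.comp_def]
    simp
  have hgetD : ∀ c ∈ pvDups g L m, c2d.getD c 0 = pvGapOf (pvPos g L m c) := by
    intro c hc
    rw [PySem.Dict.getD_of_mem_items c2d (k := c) (v := pvMinDistA g (L : Int) (n : Int) c)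
      (by rw [hitems]; exact List.mem_map_of_mem hc) (by rw [hkeys2]; exact hnodupD) 0]
    exact hMD c hc
  have hvals : c2d.values = (pvDups g L m).map (fun c => pvGapOf (pvPos g L m c)) := by
    simp only [PySem.Dict.values, hitems, List.map_map, Function.comp_def]
    exact List.map_congr_left (fun c hc => hMD c hc)
  simp only [hvals]
  have hres2 : (pvDups g L m).filter (fun c =>
        c2d.getD c 0 == (PySem.List.min? ((pvDups g L m).map (fun c => pvGapOf (pvPos g L m c)))
          (fun x => x)).getD 0)
      = (pvDups g L m).filter (fun c =>
        pvGapOf (pvPos g L m c) == (PySem.List.min? ((pvDups g L m).map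
          (fun c => pvGapOf (pvPos g L m c))) (fun x => x)).getD 0) :=
    List.filter_congr (fun c hc => by rw [hgetD c hc])
  rw [hres2]
  have hkeyfun : (fun x => (PySem.Dict.counter S).getD x 0)
      = (fun c => ((pvPos g L m c).length : Int)) := funext hcnt
  rw [hkeyfun]
  unfold pvCanon
  set best := (PySem.List.min? ((pvDups g L m).map (fun c => pvGapOf (pvPos g L m c)))
    (fun x => x)).getD 0 with hbest
  set res := (pvDups g L m).filter (fun c => pvGapOf (pvPos g L m c) == best) with hres
  split_ifs with h1 h2 h3
  · rfl
  · rfl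
  · -- sort_by == "distance": A's stable sort by the (all-equal) min distance is the identity
    apply PySem.List.sorted_eq_self_of_pairwise
    apply List.pairwise_of_forall_mem_list
    intro a ha b hb
    have hva : c2d.getD a 0 = best := by
      have hpa := List.of_mem_filter (by exact hres ▸ ha)
      rw [hgetD a (List.mem_of_mem_filter (hres ▸ ha))]
      exact beq_iff_eq.mp hpa
    have hvb : c2d.getD b 0 = best := by
      have hpb := List.of_mem_filter (by exact hres ▸ hb)
      rw [hgetD b (List.mem_of_mem_filter (hres ▸ hb))]
      exact beq_iff_eq.mp hpb
    rw [hva, hvb]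
  · rfl

-- B reduced to the canonical form
lemma pvB_eq (genome : String) (length : Int) (sort_by : String) (L n : Nat)
    (hg : genome.toList.length = n) (hlen : length = (L : Int)) (hL : 1 ≤ L) (hLn : L ≤ n) :
    find_duplicate_combinations_alt genome length sort_by
      = pvCanon genome.toList L (n - L + 1) sort_by := by
  have hlen' : PySem.Str.len genome = (n : Int) := by rw [PySem.Str.len_eq, hg]
  have hm : (n : Int) - (L : Int) + 1 = ((n - L + 1 : Nat) : Int) := by omega
  unfold find_duplicate_combinations_alt
  rw [hlen, hlen', if_neg (by simp only [Bool.or_eq_true, decide_eq_true_eq]; omega)]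
  simp only [hm, PySem.List.pyRange_zero_natCast, List.map_map, Function.comp_def]
  set m := n - L + 1 with hmdef
  set g := genome.toList with hgdef
  set S := (List.range m).map (fun (j : Nat) => pvWin g (L : Int) (j : Int)) with hS
  set pairs := (List.range m).map (fun (j : Nat) => (pvWin g (L : Int) (j : Int), (j : Int))) with hpairs
  set posD := pairs.foldl (fun d p => d.modify p.1 [] (fun x => x ++ [p.2])) PySem.Dict.empty
    with hposD
  have hgetDpos : ∀ c, posD.getD c [] = pvPos g L m c := by
    intro c
    rw [hposD, PySem.Dict.getD_foldl_modify_append pairs PySem.Dict.empty c]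
    rw [hpairs, List.filter_map, List.map_map]
    simp only [Function.comp_def, PySem.Dict.getD_empty, List.nil_append]
    rfl
  have hkeysD : posD.keys = PySem.Set.ofList S := by
    rw [hposD]
    have := PySem.Dict.keys_foldl_modify_key pairs (fun p => p.1) []
      (fun d p => fun x => x ++ [p.2]) PySem.Dict.empty
    rw [this]
    rw [hpairs, hS, List.map_map]
    simp only [Function.comp_def, PySem.Dict.keys_empty]
    rfl
  have hnodupK : posD.keys.Nodup := by rw [hkeysD]; exact PySem.Set.nodup_ofList S
  have hitemsD : posD.items = (PySem.Set.ofList S).map (fun c => (c, pvPos g L m c)) := by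
    rw [PySem.Dict.items_eq_map_keys posD hnodupK [], hkeysD]
    exact List.map_congr_left (fun c _ => by rw [hgetDpos c])
  simp only [hitemsD, List.filter_map, List.map_map, Function.comp_def]
  have hgaps : ((PySem.Set.ofList S).filter
        (fun c => decide (1 < (pvPos g L m c).length))) = pvDups g L m := by
    unfold pvDups; rw [hS]
  rw [hgaps]
  by_cases hd : pvDups g L m = []
  · rw [hd]
    simp only [List.map_nil, List.isEmpty_nil, if_pos]
    unfold pvCanon
    rw [hd]
    simp only [List.filter_nil, List.map_nil]
    split_ifs <;> simp [PySem.List.sorted_eq_nil_iff]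
  · rw [if_neg (by simp [hd])]
    have hkeyfun : (fun s => PySem.List.len (posD.getD s []))
        = (fun c => ((pvPos g L m c).length : Int)) := by
      funext c
      rw [hgetDpos c, PySem.List.len_eq]
    rw [hkeyfun]
    unfold pvCanon
    simp only [List.map_id']

-- ===== VERDICT (by name: the statement is the Claim_ definition above) =====
theorem find_duplicate_combinations_spec : Claim_equal_find_duplicate_combinations := by
  intro genome length sort_by _ hpre
  unfold Pre_find_duplicate_combinations at hpre
  unfold Spec_find_duplicate_combinations
  by_cases hgt : PySem.Str.len genome < length
  · rw [PySem.Str.len_eq] at hgt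
    have hA : find_duplicate_combinations genome length sort_by = [] := by
      unfold find_duplicate_combinations
      rw [if_pos (by rw [PySem.Str.len_eq]; exact hgt)]
    have hB : find_duplicate_combinations_alt genome length sort_by = [] := by
      unfold find_duplicate_combinations_alt
      rw [if_pos (by rw [PySem.Str.len_eq]; simp only [Bool.or_eq_true, decide_eq_true_eq]; right; exact hgt)]
    rw [hA, hB]
  · rw [not_lt] at hgt
    rw [PySem.Str.len_eq] at hgt
    have hLn : length.toNat ≤ genome.toList.length := by omega
    rw [pvA_eq genome length sort_by length.toNat genome.toList.length rfl (by omega) (by omega) hLn,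
        pvB_eq genome length sort_by length.toNat genome.toList.length rfl (by omega) (by omega) hLn]
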